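-- pv_equiv track=rewrite | github.com/zunlu/Algorithm | 求职笔刷题-牛客/03那些插队的人.py | countDislocation
-- ===== SOURCE A (Python) =====
-- def countDislocation(n , cutIn ):
--     # write code here
--     if len(cutIn) == 0:
--         return 0
--     else:
--         len_ = len(cutIn)
--         ma = max(cutIn)
--         result = ma
--         myset = set()
--         for i in reversed(range(len_)):
--             if not myset.__contains__(cutIn[i]) and len(myset)+1 == cutIn[i]:
--                 result-=1
--             myset.add(cutIn[i])
--     return result
-- ===== SOURCE B (Python) =====
-- def countDislocation(n, cutIn):
--     if not cutIn:
--         return 0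
--     last = {}
--     for i, v in enumerate(cutIn):
--         last[v] = i
--     order = sorted(last, key=lambda v: last[v], reverse=True)
--     cnt = 0
--     for k, v in enumerate(order, 1):
--         if v == k:
--             cnt += 1
--     return max(cutIn) - cnt
-- ===== Notes on version B (the rewrite author's own statement) =====
-- stated objective: alternative
-- what changed: B replaces A's reverse scan with a seen-set and a running decrement by a different strategy: a forward pass records each value's last-occurrence index in a dict, the distinct values are then sorted by last-occurrence index descending, and the rank-coincidence count over that sorted list is subtracted from max(cutIn).
import Mathlib
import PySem

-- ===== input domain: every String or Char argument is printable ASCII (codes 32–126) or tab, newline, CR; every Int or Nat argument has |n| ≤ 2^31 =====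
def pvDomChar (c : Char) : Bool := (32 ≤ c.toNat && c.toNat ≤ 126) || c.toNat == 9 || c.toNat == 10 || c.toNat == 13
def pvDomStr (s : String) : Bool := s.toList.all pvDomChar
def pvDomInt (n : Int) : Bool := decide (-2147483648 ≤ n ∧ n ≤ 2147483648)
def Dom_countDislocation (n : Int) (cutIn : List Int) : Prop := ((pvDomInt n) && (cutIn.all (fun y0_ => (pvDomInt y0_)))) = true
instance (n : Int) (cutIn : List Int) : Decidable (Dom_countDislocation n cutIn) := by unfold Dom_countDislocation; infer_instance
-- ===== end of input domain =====

-- B differs from A by algorithm/data structure: instead of A's reverse scan with a seen-set and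
-- a running decrement, B records each value's last-occurrence index in a dict (forward pass),
-- sorts the distinct values by that index descending, and counts rank coincidences there.

-- ===== PORT A =====
-- loop body of A on the current value v = cutIn[i]: state = (result, myset)
def pvStepA (st : Int × PySem.Set Int) (v : Int) : Int × PySem.Set Int :=
  (if !PySem.Set.contains st.2 v && ((PySem.Set.len st.2 : Int) + 1 == v)
   then st.1 - 1 else st.1,
   PySem.Set.add st.2 v)

def countDislocation (n : Int) (cutIn : List Int) : Int :=
  if cutIn.length = 0 then 0
  else
    let len_ := (cutIn.length : Int)
    let ma := (PySem.List.max? cutIn (fun x => x)).getD 0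
    let st := ((PySem.List.pyRange 0 len_ 1).reverse).foldl
      (fun st i => pvStepA st (PySem.List.pyGetD cutIn i 0)) (ma, PySem.Set.empty)
    st.1

-- ===== PORT B =====
-- the dict `last`: value -> index of its last occurrence (forward enumerate, overwrite)
def pvLastDict (cutIn : List Int) : PySem.Dict Int Int :=
  (PySem.List.enumerate cutIn 0).foldl (fun d p => d.insert p.2 p.1) PySem.Dict.empty

-- the cnt loop of Source B: for k, v in enumerate(order, 1): if v == k: cnt += 1
def pvCntB (order : List Int) : Int :=
  (PySem.List.enumerate order 1).foldl (fun c p => if p.2 == p.1 then c + 1 else c) 0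

def countDislocation_alt (n : Int) (cutIn : List Int) : Int :=
  if cutIn = [] then 0
  else
    let last := pvLastDict cutIn
    let order := PySem.List.sorted last.keys (fun v => last.getD v 0) true
    (PySem.List.max? cutIn (fun x => x)).getD 0 - pvCntB order

-- ===== PRECONDITION & SPEC =====
def Spec_countDislocation (n : Int) (cutIn : List Int) (out : Int) : Prop := out = countDislocation_alt n cutIn
instance (n : Int) (cutIn : List Int) (out : Int) : Decidable (Spec_countDislocation n cutIn out) := by unfold Spec_countDislocation; infer_instance

-- ===== CLAIM (what is proved, stated in full; the proofs are below) =====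
def Claim_equal_countDislocation : Prop := ∀ (n : Int) (cutIn : List Int), Dom_countDislocation n cutIn → Spec_countDislocation n cutIn (countDislocation n cutIn)

-- ===== LEMMAS AND PROOFS =====

-- number of decrements A performs on traversal list l starting from seen-set s
def pvDec : List Int → PySem.Set Int → Int
  | [], _ => 0
  | v :: t, s =>
      (if !PySem.Set.contains s v && ((PySem.Set.len s : Int) + 1 == v) then 1 else 0)
        + pvDec t (PySem.Set.add s v)

theorem pvStepA_foldl :
    ∀ (l : List Int) (r : Int) (s : PySem.Set Int),
      (l.foldl pvStepA (r, s)).1 = r - pvDec l s := by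
  intro l
  induction l with
  | nil => intro r s; simp [pvDec]
  | cons v t ih =>
      intro r s
      simp only [List.foldl_cons]
      rw [show pvStepA (r, s) v
            = ((if !PySem.Set.contains s v && ((PySem.Set.len s : Int) + 1 == v)
                then r - 1 else r), PySem.Set.add s v) from rfl]
      rw [ih]
      simp only [pvDec]
      split_ifs <;> ring

theorem pvRevRange_foldl {σ : Type} (xs : List Int) (g : σ → Int → σ) (init : σ) :
    ((PySem.List.pyRange 0 (xs.length : Int) 1).reverse).foldl
        (fun st i => g st (PySem.List.pyGetD xs i 0)) init
      = xs.reverse.foldl g init := by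
  have h : (PySem.List.pyRange 0 (xs.length : Int) 1).map (fun i => PySem.List.pyGetD xs i 0) = xs :=
    PySem.List.map_pyGetD_pyRange_zero xs 0
  calc ((PySem.List.pyRange 0 (xs.length : Int) 1).reverse).foldl
        (fun st i => g st (PySem.List.pyGetD xs i 0)) init
      = (((PySem.List.pyRange 0 (xs.length : Int) 1).reverse).map
          (fun i => PySem.List.pyGetD xs i 0)).foldl g init := by
        rw [List.foldl_map]
    _ = xs.reverse.foldl g init := by rw [List.map_reverse, h]

theorem pvCntB_append_one (s : List Int) (v : Int) :
    pvCntB (s ++ [v]) = pvCntB s + (if ((s.length : Int) + 1 == v) then 1 else 0) := by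
  unfold pvCntB
  rw [PySem.List.enumerate_append, List.foldl_append]
  simp only [PySem.List.enumerate_cons, PySem.List.enumerate_nil, List.foldl_cons, List.foldl_nil]
  simp only [beq_iff_eq]
  split_ifs <;> omega

-- the rank-coincidence count over the accumulated dedup list equals A's decrement count
theorem pvCnt_foldl_add : ∀ (l : List Int) (s : PySem.Set Int),
    pvCntB (l.foldl PySem.Set.add s) = pvCntB s + pvDec l s := by
  intro l
  induction l with
  | nil => intro s; simp [pvDec]
  | cons v t ih =>
      intro s
      simp only [List.foldl_cons]
      by_cases hm : v ∈ s
      · have hc : PySem.Set.contains s v = true := (PySem.Set.contains_iff s v).2 hm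
        rw [PySem.Set.add_of_mem hm, ih]
        simp [pvDec, hm]
      · have hc : PySem.Set.contains s v = false := by
          cases h : PySem.Set.contains s v
          · rfl
          · exact absurd ((PySem.Set.contains_iff s v).1 h) hm
        rw [PySem.Set.add_of_not_mem hm, ih]
        simp only [pvDec, hc, PySem.Set.add_of_not_mem hm, pvCntB_append_one]
        have hlen : (PySem.Set.len s : Int) = (s.length : Int) := by simp [PySem.Set.len]
        rw [hlen]
        simp only [Bool.not_false, Bool.true_and]
        ring

theorem pvLastDict_keys (xs : List Int) :
    (pvLastDict xs).keys = PySem.Set.ofList xs := by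
  have h := PySem.Dict.keys_foldl_insert_key (PySem.List.enumerate xs 0)
    (fun p => p.2) (fun _ p => p.1) (PySem.Dict.empty (ν := Int))
  rw [PySem.List.map_snd_enumerate, PySem.Dict.keys_empty, PySem.Set.update_nil_left] at h
  exact h

theorem pvLastDict_append (xs : List Int) (x v : Int) :
    (pvLastDict (xs ++ [x])).getD v 0
      = if v = x then (xs.length : Int) else (pvLastDict xs).getD v 0 := by
  unfold pvLastDict
  rw [PySem.List.enumerate_append, List.foldl_append]
  simp only [PySem.List.enumerate_cons, PySem.List.enumerate_nil, List.foldl_cons, List.foldl_nil]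
  rw [PySem.Dict.getD_insert]
  simp

theorem pvLastDict_lt_length (xs : List Int) :
    ∀ v ∈ xs, (pvLastDict xs).getD v 0 < (xs.length : Int) := by
  induction xs using List.reverseRecOn with
  | nil => intro v hv; simp at hv
  | append_singleton xs x ih =>
      intro v hv
      rw [pvLastDict_append]
      by_cases hvx : v = x
      · simp [hvx]
      · have hv' : v ∈ xs := by
          rcases List.mem_append.1 hv with h | h
          · exact h
          · simp at h; exact absurd h hvx
        rw [if_neg hvx]
        have := ih v hv'
        simp only [List.length_append, List.length_cons, List.length_nil]
        omega

theorem pvPairwise_R (xs : List Int) :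
    (PySem.Set.ofList xs.reverse).Pairwise
      (fun a b => (pvLastDict xs).getD b 0 < (pvLastDict xs).getD a 0) := by
  induction xs using List.reverseRecOn with
  | nil => simp
  | append_singleton xs x ih =>
      rw [List.reverse_append, List.reverse_singleton, List.singleton_append,
          PySem.Set.ofList_cons]
      constructor
      · intro y hy
        have hmem := (PySem.Set.mem_discard (PySem.Set.ofList xs.reverse) x y).1 hy
        have hyx : y ≠ x := hmem.2
        have hyxs : y ∈ xs := by
          have := (PySem.Set.mem_ofList xs.reverse y).1 hmem.1
          simpa using this
        rw [pvLastDict_append, pvLastDict_append, if_pos rfl, if_neg hyx]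
        exact pvLastDict_lt_length xs y hyxs
      · -- tail: the discard list is pairwise under the extended dict
        have hsub : List.Sublist (PySem.Set.discard (PySem.Set.ofList xs.reverse) x)
            (PySem.Set.ofList xs.reverse) := List.filter_sublist
        refine List.Pairwise.imp_of_mem ?_ (ih.sublist hsub)
        intro a b ha hb hab
        have hax : a ≠ x := ((PySem.Set.mem_discard _ x a).1 ha).2
        have hbx : b ≠ x := ((PySem.Set.mem_discard _ x b).1 hb).2
        rw [pvLastDict_append, pvLastDict_append, if_neg hax, if_neg hbx]
        exact hab

theorem pvOrder_eq (xs : List Int) :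
    PySem.List.sorted (pvLastDict xs).keys (fun v => (pvLastDict xs).getD v 0) true
      = PySem.Set.ofList xs.reverse := by
  apply PySem.List.sorted_rev_eq_of_perm_of_pairwise_gt
  · rw [pvLastDict_keys]
    apply (List.perm_ext_iff_of_nodup (PySem.Set.nodup_ofList _) (PySem.Set.nodup_ofList _)).2
    intro y
    simp [PySem.Set.mem_ofList]
  · exact pvPairwise_R xs

-- ===== VERDICT (by name: the statement is the Claim_ definition above) =====
theorem countDislocation_spec : Claim_equal_countDislocation := by
  intro n cutIn _
  unfold Spec_countDislocation countDislocation countDislocation_alt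
  by_cases hnil : cutIn = []
  · simp [hnil]
  · have hlen : ¬ cutIn.length = 0 := by simpa using hnil
    simp only [hlen, hnil, ite_false]
    rw [pvRevRange_foldl cutIn pvStepA
        ((PySem.List.max? cutIn (fun x => x)).getD 0, PySem.Set.empty)]
    rw [pvStepA_foldl]
    rw [pvOrder_eq]
    have h1 : PySem.Set.ofList cutIn.reverse
        = cutIn.reverse.foldl PySem.Set.add PySem.Set.empty :=
      PySem.Set.ofList_eq_foldl _
    rw [h1, pvCnt_foldl_add]
    have h0 : pvCntB PySem.Set.empty = 0 := by
      simp [pvCntB, PySem.Set.empty, PySem.List.enumerate_nil]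
    rw [h0]
    ring
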